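-- pv_equiv track=rewrite | github.com/hcheng628/algorithm-problems | algorithm-problems/src/main/java/us/supercheng/algorithm/problems/leetcode/maximumdifferencebetweenincreasingelements/Solution.py | maximumDifferenceDP
-- ===== SOURCE A (Python) =====
-- def maximumDifferenceDP(nums):
--     """
--     :type nums: List[int]
--     :rtype: int
--     """
--     ret = -1
--     maxes = [nums[-1]]
--     for i in range(len(nums) - 2, -1, -1):
--         maxes.insert(0, max(maxes[0], nums[i]))
--
--     for i in range(len(nums) - 1):
--         ret = max(maxes[i + 1] - nums[i], ret)
--
--     return -1 if ret < 1 else ret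
-- ===== SOURCE B (Python) =====
-- def maximumDifferenceDP(nums):
--     ans = -1
--     mn = nums[0]
--     for x in nums[1:]:
--         if x > mn:
--             ans = max(ans, x - mn)
--         else:
--             mn = x
--     return ans
-- ===== Notes on version B (the rewrite author's own statement) =====
-- stated objective: faster
-- what changed: Replaced the backwards suffix-maxima list (built with insert(0,...)) plus a second indexed pass by a single forward pass that tracks the running minimum and the best positive difference.
import Mathlib
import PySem

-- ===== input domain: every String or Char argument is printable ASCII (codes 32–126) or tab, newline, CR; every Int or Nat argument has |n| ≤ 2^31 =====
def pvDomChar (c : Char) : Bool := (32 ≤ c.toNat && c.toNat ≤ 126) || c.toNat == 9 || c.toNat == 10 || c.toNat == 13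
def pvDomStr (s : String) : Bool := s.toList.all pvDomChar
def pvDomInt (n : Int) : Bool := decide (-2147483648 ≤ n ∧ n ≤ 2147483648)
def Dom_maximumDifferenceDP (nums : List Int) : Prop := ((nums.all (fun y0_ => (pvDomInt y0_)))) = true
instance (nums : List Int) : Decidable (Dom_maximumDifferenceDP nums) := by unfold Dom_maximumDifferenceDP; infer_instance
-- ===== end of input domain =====

-- B replaces A's quadratic suffix-maxima construction (insert(0,...) in a loop) plus second
-- indexed pass by a single forward pass tracking the running minimum (objective: faster).


-- ===== PORT A =====
-- first loop of A: maxes starts as [nums[-1]] and each step prepends max(maxes[0], nums[i]);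
-- the same construction as structural recursion over the list (suffix maxima).
def sufMaxes : List Int → List Int
  | [] => []
  | [x] => [x]
  | x :: y :: rest =>
      let ms := sufMaxes (y :: rest)
      (max (ms.headD 0) x) :: ms

-- second loop: for i in range(len-1): ret = max(maxes[i+1] - nums[i], ret);
-- pairing nums[i] with maxes[i+1] is zip nums (maxes.drop 1).
def maximumDifferenceDP (nums : List Int) : Int :=
  let maxes := sufMaxes nums
  let ret := (nums.zip (maxes.drop 1)).foldl (fun r p => max (p.2 - p.1) r) (-1)
  if ret < 1 then -1 else ret

-- ===== PORT B =====
def maximumDifferenceDP_alt (nums : List Int) : Int :=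
  ((nums.drop 1).foldl
    (fun s x => if x > s.2 then (max s.1 (x - s.2), s.2) else (s.1, x))
    (-1, nums.headD 0)).1

-- ===== PRECONDITION & SPEC =====
-- Pre_ excludes only the empty list, on which both Pythons raise IndexError (nums[-1] / nums[0]).
def Pre_maximumDifferenceDP (nums : List Int) : Prop := nums ≠ []
instance (nums : List Int) : Decidable (Pre_maximumDifferenceDP nums) := by
  unfold Pre_maximumDifferenceDP; infer_instance
def pvWitness_maximumDifferenceDP : List Int := [3, 1, 4, 1, 5]

def Spec_maximumDifferenceDP (nums : List Int) (out : Int) : Prop := out = maximumDifferenceDP_alt nums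
instance (nums : List Int) (out : Int) : Decidable (Spec_maximumDifferenceDP nums out) := by unfold Spec_maximumDifferenceDP; infer_instance

-- ===== CLAIM (what is proved, stated in full; the proofs are below) =====
def Claim_equal_maximumDifferenceDP : Prop := ∀ (nums : List Int), Dom_maximumDifferenceDP nums → Pre_maximumDifferenceDP nums → Spec_maximumDifferenceDP nums (maximumDifferenceDP nums)

-- ===== LEMMAS AND PROOFS =====

-- maximum of a nonempty list (spec-side helper)
def listMax : List Int → Int
  | [] => 0
  | [x] => x
  | x :: y :: l => max x (listMax (y :: l))

-- S m l = max(-1, max_j (l[j] - min(m, min of l before j))) as a recursion on l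
def pmS : Int → List Int → Int
  | _, [] => -1
  | m, y :: l => max (y - m) (pmS (min m y) l)

-- B's accumulator, ans component only
def pmBest : Int → List Int → Int
  | _, [] => -1
  | m, y :: l => if y > m then max (y - m) (pmBest m l) else pmBest y l

-- A's second loop as a function of the list
def pmR (nums : List Int) : Int :=
  (nums.zip ((sufMaxes nums).drop 1)).foldl (fun r p => max (p.2 - p.1) r) (-1)

theorem sufMaxes_eq (x : Int) (l : List Int) :
    sufMaxes (x :: l) = listMax (x :: l) :: sufMaxes l := by
  induction l generalizing x with
  | nil => simp [sufMaxes, listMax]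
  | cons y l ih =>
      simp only [sufMaxes, ih y, listMax, List.headD]
      rw [max_comm]

theorem foldl_max_shift (l : List (Int × Int)) (a c : Int) :
    l.foldl (fun r p => max (p.2 - p.1) r) (max c a)
      = max c (l.foldl (fun r p => max (p.2 - p.1) r) a) := by
  induction l generalizing a with
  | nil => rfl
  | cons p l ih =>
      simp only [List.foldl]
      rw [max_left_comm (p.2 - p.1) c a] at *
      rw [ih]

theorem pmR_cons (x y : Int) (l : List Int) :
    pmR (x :: y :: l) = max (listMax (y :: l) - x) (pmR (y :: l)) := by
  simp only [pmR, sufMaxes_eq, List.drop_succ_cons, List.drop_zero, List.zip_cons_cons,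
    List.foldl]
  exact foldl_max_shift _ (-1) (listMax (y :: l) - x)

theorem pmS_min (l : List Int) : ∀ a b, pmS (min a b) l = max (pmS a l) (pmS b l) := by
  induction l with
  | nil => intro a b; simp [pmS]
  | cons y l ih =>
      intro a b
      simp only [pmS]
      have h : min (min a b) y = min (min a y) (min b y) := by omega
      rw [h, ih (min a y) (min b y)]
      omega

theorem listMax_le_pmS (l : List Int) : ∀ x, l ≠ [] → listMax l - x ≤ pmS x l := by
  induction l with
  | nil => intro x h; exact absurd rfl h
  | cons y l ih =>
      intro x _
      cases l with
      | nil =>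
          show y - x ≤ max (y - x) (pmS (min x y) [])
          simp [pmS]
      | cons z l' =>
          have h1 := ih (min x y) (by simp)
          show max y (listMax (z :: l')) - x ≤ max (y - x) (pmS (min x y) (z :: l'))
          omega

theorem pmS_le (l : List Int) : ∀ x y, l ≠ [] → pmS x l ≤ max (listMax l - x) (pmS y l) := by
  induction l with
  | nil => intro x y h; exact absurd rfl h
  | cons z l ih =>
      intro x y _
      cases l with
      | nil =>
          show max (z - x) (pmS (min x z) []) ≤ max (z - x) (max (z - y) (pmS (min y z) []))
          simp only [pmS]
          omega
      | cons w l' =>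
          have h1 := ih (min x z) (min y z) (by simp)
          have h2 := listMax_le_pmS (w :: l') (min y z) (by simp)
          show max (z - x) (pmS (min x z) (w :: l')) ≤
            max (max z (listMax (w :: l')) - x) (max (z - y) (pmS (min y z) (w :: l')))
          omega

theorem pmR_eq_pmS (l : List Int) : ∀ x, pmR (x :: l) = pmS x l := by
  induction l with
  | nil => intro x; rfl
  | cons y l ih =>
      intro x
      rw [pmR_cons, ih y]
      cases l with
      | nil =>
          show max (listMax [y] - x) (pmS y []) = pmS x [y]
          simp [listMax, pmS]
      | cons z l' =>
          have hsplit := pmS_min (z :: l') x y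
          have h1 := listMax_le_pmS (z :: l') x (by simp)
          have h2 := pmS_le (z :: l') x y (by simp)
          show max (max y (listMax (z :: l')) - x) (pmS y (z :: l'))
            = max (y - x) (pmS (min x y) (z :: l'))
          omega

theorem pmBest_clip (l : List Int) :
    ∀ m, pmBest m l = if pmS m l < 1 then -1 else pmS m l := by
  induction l with
  | nil => intro m; rfl
  | cons y l ih =>
      intro m
      simp only [pmBest, pmS]
      by_cases h : y > m
      · have hm : min m y = m := by omega
        rw [hm, ih m, if_pos h]
        split_ifs <;> omega
      · have hm : min m y = y := by omega
        rw [hm, ih y, if_neg h]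
        split_ifs <;> omega

theorem alt_eq_pmBest (x : Int) (l : List Int) :
    maximumDifferenceDP_alt (x :: l) = pmBest x l := by
  have key : ∀ (l : List Int) (a m : Int), -1 ≤ a →
      ((l.foldl (fun s x => if x > s.2 then (max s.1 (x - s.2), s.2) else (s.1, x))
        (a, m)).1 : Int) = max a (pmBest m l) := by
    intro l
    induction l with
    | nil => intro a m ha; simp [pmBest]; omega
    | cons y l ih =>
        intro a m ha
        simp only [List.foldl, pmBest]
        by_cases h : y > m
        · rw [if_pos h, if_pos h, ih (max a (y - m)) m (by omega)]
          omega
        · rw [if_neg h, if_neg h, ih a y ha]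
  simp only [maximumDifferenceDP_alt, List.drop_succ_cons, List.drop_zero, List.headD]
  rw [key l (-1) x le_rfl]
  have : -1 ≤ pmBest x l := by
    induction l generalizing x with
    | nil => simp [pmBest]
    | cons y l ih =>
        simp only [pmBest]; by_cases h : y > x
        · rw [if_pos h]; have := ih x; omega
        · rw [if_neg h]; exact ih y
  omega

-- ===== VERDICT (by name: the statement is the Claim_ definition above) =====
theorem maximumDifferenceDP_spec : Claim_equal_maximumDifferenceDP := by
  intro nums _ hpre
  cases nums with
  | nil => exact absurd rfl hpre
  | cons x l =>
      show maximumDifferenceDP (x :: l) = maximumDifferenceDP_alt (x :: l)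
      rw [alt_eq_pmBest, pmBest_clip]
      simp only [maximumDifferenceDP]
      rw [show (((x :: l).zip ((sufMaxes (x :: l)).drop 1)).foldl
          (fun r p => max (p.2 - p.1) r) (-1)) = pmR (x :: l) from rfl]
      rw [pmR_eq_pmS]
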